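-- pv_equiv track=rewrite | github.com/spirali/kaira | ptp/gencpp/writer.py | replace_dolar
-- ===== SOURCE A (Python) =====
-- def replace_dolar(string, text):
--     result = []
--     l = len(string)
--     i = 0
--     while i < l:
--         c = string[i]
--         if c == "$":
--             if i + 1 < l and string[i + 1] == c:
--                 i += 1
--                 result.append(c)
--             else:
--                 result.append(text)
--         else:
--             result.append(c)
--         i += 1
--     return "".join(result)
-- ===== SOURCE B (Python) =====
-- import re
--
-- def replace_dolar(string, text):
--     return re.sub(r"\$\$|\$",
--                   lambda m: "$" if m.group() == "$$" else text,
--                   string)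
-- ===== Notes on version B (the rewrite author's own statement) =====
-- stated objective: idiomatic
-- what changed: The manual index loop with lookahead and a result list is replaced by a single re.sub with the alternation '$$|$' and a function replacement, which matches '$$' before a lone '$' left to right.
import Mathlib
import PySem

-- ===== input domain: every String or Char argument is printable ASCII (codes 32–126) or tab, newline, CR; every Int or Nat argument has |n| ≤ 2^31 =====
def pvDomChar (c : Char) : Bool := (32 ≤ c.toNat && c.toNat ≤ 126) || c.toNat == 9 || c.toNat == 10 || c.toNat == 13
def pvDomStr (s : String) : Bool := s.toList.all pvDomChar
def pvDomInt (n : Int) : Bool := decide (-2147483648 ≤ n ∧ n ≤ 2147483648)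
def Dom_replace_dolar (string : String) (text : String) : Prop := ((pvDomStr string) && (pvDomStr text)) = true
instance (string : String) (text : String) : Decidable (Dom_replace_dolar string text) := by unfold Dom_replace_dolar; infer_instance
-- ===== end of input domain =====

-- B replaces A's manual index loop (lookahead, result list, join) by a single
-- regex substitution re.sub(r"$$|$", repl, string); same values, idiomatic rewrite.


-- ===== PORT A =====
-- while-loop over index i with one-character lookahead, appending pieces to
-- `result`, finally "".join(result).  Indices are always in range, so list
-- indexing is via getD (exact here).
def replaceDolarLoop (cs : List Char) (l : Nat) (text : String) (i : Nat)
    (result : List String) : List String :=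
  if _h : i < l then
    let c := cs.getD i ' '
    if c = '$' then
      if i + 1 < l ∧ cs.getD (i + 1) ' ' = c then
        -- i += 1; result.append(c); i += 1
        replaceDolarLoop cs l text (i + 2) (result ++ [String.ofList [c]])
      else
        replaceDolarLoop cs l text (i + 1) (result ++ [text])
    else
      replaceDolarLoop cs l text (i + 1) (result ++ [String.ofList [c]])
  else
    result
termination_by l - i

def replace_dolar (string : String) (text : String) : String :=
  String.join (replaceDolarLoop string.toList string.toList.length text 0 [])

-- ===== PORT B =====
-- the regex engine's left-to-right scan with alternation "$$" before "$":
-- at each position, match "$$" if possible, else a lone "$", else copy the char.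
def replaceDolarRe (text : String) : List Char → List Char
  | [] => []
  | c :: rest =>
    if c = '$' then
      if rest.head? = some '$' then '$' :: replaceDolarRe text rest.tail
      else text.toList ++ replaceDolarRe text rest
    else c :: replaceDolarRe text rest
termination_by cs => cs.length
decreasing_by all_goals (cases rest <;> simp [List.tail])

def replace_dolar_alt (string : String) (text : String) : String :=
  String.ofList (replaceDolarRe text string.toList)

-- ===== PRECONDITION & SPEC =====
def Spec_replace_dolar (string : String) (text : String) (out : String) : Prop := out = replace_dolar_alt string text
instance (string : String) (text : String) (out : String) : Decidable (Spec_replace_dolar string text out) := by unfold Spec_replace_dolar; infer_instance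

-- ===== CLAIM (what is proved, stated in full; the proofs are below) =====
def Claim_equal_replace_dolar : Prop := ∀ (string : String) (text : String), Dom_replace_dolar string text → Spec_replace_dolar string text (replace_dolar string text)

-- ===== LEMMAS AND PROOFS =====

theorem join_append_one (L : List String) (x : String) :
    String.join (L ++ [x]) = String.join L ++ x := by
  simp [String.join, List.foldl_append]

theorem ofList_cons1 (c : Char) (l : List Char) :
    String.ofList [c] ++ String.ofList l = String.ofList (c :: l) := by
  rw [show (c :: l) = [c] ++ l from rfl, String.ofList_append]

theorem str_append_ofList (s : String) (l : List Char) :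
    s ++ String.ofList l = String.ofList (s.toList ++ l) := by
  conv_lhs => rw [← (String.ofList_toList (s := s))]
  simp

theorem loop_eq (cs : List Char) (text : String) :
    ∀ n i result, cs.length - i = n →
      String.join (replaceDolarLoop cs cs.length text i result)
      = String.join result ++ String.ofList (replaceDolarRe text (cs.drop i)) := by
  intro n
  induction n using Nat.strong_induction_on with
  | _ n ih =>
    intro i result hn
    rw [replaceDolarLoop]
    by_cases h : i < cs.length
    · have hdrop : cs.drop i = cs.getD i ' ' :: cs.drop (i + 1) := by
        rw [List.drop_eq_getElem_cons h]
        simp [List.getD, List.getElem?_eq_getElem h]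
      simp only [h, dif_pos]
      by_cases hc : cs.getD i ' ' = '$'
      · by_cases h2 : i + 1 < cs.length ∧ cs.getD (i + 1) ' ' = cs.getD i ' '
        · -- "$$" matched
          have hdrop2 : cs.drop (i + 1) = cs.getD (i + 1) ' ' :: cs.drop (i + 2) := by
            rw [List.drop_eq_getElem_cons h2.1]
            simp [List.getD, List.getElem?_eq_getElem h2.1]
          rw [if_pos hc, if_pos h2,
            ih (cs.length - (i + 2)) (by omega) (i + 2) _ rfl, join_append_one,
            hdrop, replaceDolarRe]
          rw [hdrop2]
          simp only [hc, h2.2, List.head?_cons, List.tail_cons, if_pos]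
          rw [String.append_assoc, ofList_cons1]
        · -- lone "$" matched
          rw [if_pos hc, if_neg h2,
            ih (cs.length - (i + 1)) (by omega) (i + 1) _ rfl, join_append_one,
            hdrop, replaceDolarRe]
          have hne : ¬ (cs.drop (i + 1)).head? = some '$' := by
            intro habs
            rcases List.head?_eq_some_iff.mp habs with ⟨tl, htl⟩
            apply h2
            have h1 : i + 1 < cs.length := by
              have := congrArg List.length htl
              simp at this; omega
            refine ⟨h1, ?_⟩
            have hd : cs.drop (i + 1) = cs.getD (i + 1) ' ' :: cs.drop (i + 2) := by
              rw [List.drop_eq_getElem_cons h1]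
              simp [List.getD, List.getElem?_eq_getElem h1]
            rw [hd] at htl
            rw [hc]
            have := congrArg List.head? htl
            simpa using this
          simp only [hc, if_pos, hne, reduceIte]
          rw [String.append_assoc, str_append_ofList]
      · rw [if_neg hc, ih (cs.length - (i + 1)) (by omega) (i + 1) _ rfl,
          join_append_one, hdrop, replaceDolarRe]
        simp only [hc, reduceIte]
        rw [String.append_assoc, ofList_cons1]
    · simp only [h, dif_neg, not_false_iff]
      have hnil : cs.drop i = [] := List.drop_eq_nil_of_le (by omega)
      rw [hnil]
      simp [replaceDolarRe]

-- ===== VERDICT (by name: the statement is the Claim_ definition above) =====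
theorem replace_dolar_spec : Claim_equal_replace_dolar := by
  intro s t _
  unfold Spec_replace_dolar replace_dolar replace_dolar_alt
  rw [loop_eq _ _ _ 0 _ rfl]
  simp [String.join]
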